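-- pv_equiv track=rewrite | github.com/ivanw314/BARD1_SGE_analysis | Scripts/SGE_FilterImpossibleAAs_beta.py | mutate_snvs
-- ===== SOURCE A (Python) =====
-- def mutate_snvs(dna_sequence): #Mutates all possible SNVs of provided DNA sequence
--     snvs = []
--     i = 0
--     while i < len(dna_sequence):
--         if dna_sequence[i] == "A":
--             snvs.append(dna_sequence[:i] + "T" + dna_sequence[i + 1 :])
--             snvs.append(dna_sequence[:i] + "C" + dna_sequence[i + 1 :])
--             snvs.append(dna_sequence[:i] + "G" + dna_sequence[i + 1 :])
--         elif dna_sequence[i] == "T":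
--             snvs.append(dna_sequence[:i] + "A" + dna_sequence[i + 1 :])
--             snvs.append(dna_sequence[:i] + "C" + dna_sequence[i + 1 :])
--             snvs.append(dna_sequence[:i] + "G" + dna_sequence[i + 1 :])
--         elif dna_sequence[i] == "C":
--             snvs.append(dna_sequence[:i] + "A" + dna_sequence[i + 1 :])
--             snvs.append(dna_sequence[:i] + "T" + dna_sequence[i + 1 :])
--             snvs.append(dna_sequence[:i] + "G" + dna_sequence[i + 1 :])
--         else:
--             snvs.append(dna_sequence[:i] + "A" + dna_sequence[i + 1 :])
--             snvs.append(dna_sequence[:i] + "T" + dna_sequence[i + 1 :])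
--             snvs.append(dna_sequence[:i] + "C" + dna_sequence[i + 1 :])
--         i += 1
--     return snvs
-- ===== SOURCE B (Python) =====
-- def mutate_snvs(dna_sequence):
--     # Single left-to-right scan maintaining a prefix/suffix pair; a substitution
--     # table replaces the four-way if/elif chain ('ATC' default covers G and any
--     # other character, exactly as the original else branch).
--     subs = {'A': 'TCG', 'T': 'ACG', 'C': 'ATG'}
--     snvs = []
--     prefix = ''
--     rest = dna_sequence
--     while rest:
--         base, tail = rest[0], rest[1:]
--         for nt in subs.get(base, 'ATC'):
--             snvs.append(prefix + nt + tail)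
--         prefix += base
--         rest = tail
--     return snvs
-- ===== Notes on version B (the rewrite author's own statement) =====
-- stated objective: simpler
-- what changed: Replaces the index-based while loop with four hard-coded if/elif branches by a single prefix/suffix scan driven by a substitution table whose lookup default covers G and every other character, removing both the index arithmetic and the branch chain.
import Mathlib
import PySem

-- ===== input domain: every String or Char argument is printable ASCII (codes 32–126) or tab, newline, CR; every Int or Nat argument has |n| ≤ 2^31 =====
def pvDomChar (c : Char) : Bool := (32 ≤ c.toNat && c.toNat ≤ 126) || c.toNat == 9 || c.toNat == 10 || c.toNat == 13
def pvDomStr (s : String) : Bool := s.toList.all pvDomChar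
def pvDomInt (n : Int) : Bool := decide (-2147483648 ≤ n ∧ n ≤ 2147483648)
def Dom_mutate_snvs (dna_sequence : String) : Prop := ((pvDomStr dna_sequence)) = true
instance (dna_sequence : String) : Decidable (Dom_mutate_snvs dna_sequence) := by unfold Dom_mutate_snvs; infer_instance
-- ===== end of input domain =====

-- B replaces A's index-based while loop with four if/elif branches by a table-driven
-- prefix/suffix scan; proved to return exactly A's list on every input (objective: simpler).


-- ===== PORT A =====
-- dna_sequence[:i] + c + dna_sequence[i+1:] with 0 ≤ i < len: the slices are
-- exactly take i / drop (i+1) (PySem.List.slice_to_natCast / slice_from_natCast).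
def substA (s : List Char) (i : Nat) (c : Char) : String :=
  String.ofList (s.take i ++ c :: s.drop (i + 1))

-- the while loop of A, state (i, snvs)
def loopA (s : List Char) (i : Nat) (snvs : List String) : List String :=
  if h : i < s.length then
    loopA s (i + 1)
      (if s[i] = 'A' then snvs ++ [substA s i 'T', substA s i 'C', substA s i 'G']
       else if s[i] = 'T' then snvs ++ [substA s i 'A', substA s i 'C', substA s i 'G']
       else if s[i] = 'C' then snvs ++ [substA s i 'A', substA s i 'T', substA s i 'G']
       else snvs ++ [substA s i 'A', substA s i 'T', substA s i 'C'])
  else snvs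
termination_by s.length - i

def mutate_snvs (dna_sequence : String) : List String :=
  loopA dna_sequence.toList 0 []

-- ===== PORT B =====
def subsTable : PySem.Dict Char String :=
  PySem.Dict.ofList [('A', "TCG"), ('T', "ACG"), ('C', "ATG")]

-- the while loop of B, state (prefix, rest, snvs); the inner for over
-- subs.get(base, 'ATC') is the map over its characters
def loopB (pre rest : List Char) (snvs : List String) : List String :=
  match rest with
  | [] => snvs
  | base :: tail =>
      loopB (pre ++ [base]) tail
        (snvs ++ ((PySem.Dict.getD subsTable base "ATC").toList).map
          (fun nt => String.ofList (pre ++ nt :: tail)))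

def mutate_snvs_alt (dna_sequence : String) : List String :=
  loopB [] dna_sequence.toList []

-- ===== PRECONDITION & SPEC =====
def Spec_mutate_snvs (dna_sequence : String) (out : List String) : Prop := out = mutate_snvs_alt dna_sequence
instance (dna_sequence : String) (out : List String) : Decidable (Spec_mutate_snvs dna_sequence out) := by unfold Spec_mutate_snvs; infer_instance

-- ===== CLAIM (what is proved, stated in full; the proofs are below) =====
def Claim_equal_mutate_snvs : Prop := ∀ (dna_sequence : String), Dom_mutate_snvs dna_sequence → Spec_mutate_snvs dna_sequence (mutate_snvs dna_sequence)

-- ===== LEMMAS AND PROOFS =====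

-- the table lookup with default 'ATC' agrees with A's if/elif chain
lemma getD_subsTable (c : Char) :
    (PySem.Dict.getD subsTable c "ATC").toList =
      (if c = 'A' then ['T', 'C', 'G']
       else if c = 'T' then ['A', 'C', 'G']
       else if c = 'C' then ['A', 'T', 'G']
       else ['A', 'T', 'C']) := by
  by_cases hA : c = 'A'
  · subst hA; decide
  · by_cases hT : c = 'T'
    · subst hT; decide
    · by_cases hC : c = 'C'
      · subst hC; decide
      · simp [subsTable, PySem.Dict.ofList, PySem.Dict.update, PySem.Dict.getD_insert,
              PySem.Dict.getD_empty, hA, hT, hC]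

lemma loopA_eq_loopB (s : List Char) :
    ∀ i snvs, loopA s i snvs = loopB (s.take i) (s.drop i) snvs := by
  intro i
  induction' hn : s.length - i using Nat.strong_induction_on with n IH generalizing i
  intro snvs
  rw [loopA]
  by_cases h : i < s.length
  · have hdrop : s.drop i = s[i] :: s.drop (i + 1) := List.drop_eq_getElem_cons h
    have htake : s.take (i + 1) = s.take i ++ [s[i]] := by
      rw [List.take_add_one]; simp [List.getElem?_eq_getElem h]
    rw [dif_pos h, IH (s.length - (i + 1)) (by omega) (i + 1) rfl, hdrop, loopB, ← htake]
    congr 1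
    rw [getD_subsTable]
    split_ifs <;> simp [substA]
  · rw [dif_neg h, List.drop_eq_nil_of_le (by omega), loopB]

-- ===== VERDICT (by name: the statement is the Claim_ definition above) =====
theorem mutate_snvs_spec : Claim_equal_mutate_snvs := by
  intro dna _
  unfold Spec_mutate_snvs mutate_snvs mutate_snvs_alt
  simpa using loopA_eq_loopB dna.toList 0 []
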